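-- pv_equiv track=rewrite | github.com/Jane-0221/ROS2_WS | archive/medipick_moveit_workspace_backup_v4_20260409_124144/scripts/record_x11_window.py | _extract_mask_shift
-- ===== SOURCE A (Python) =====
-- def _extract_mask_shift(mask: int) -> tuple[int, int]:
--     if mask == 0:
--         return 0, 8
--     shift = 0
--     while ((mask >> shift) & 1) == 0:
--         shift += 1
--     width = 0
--     while ((mask >> (shift + width)) & 1) == 1:
--         width += 1
--     return shift, width
-- ===== SOURCE B (Python) =====
-- def _extract_mask_shift(mask: int) -> tuple[int, int]:
--     if mask == 0:
--         return 0, 8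
--     if mask % 2 == 0:
--         shift, width = _extract_mask_shift(mask // 2)
--         return shift + 1, width
--     return 0, _trailing_ones(mask)
--
--
-- def _trailing_ones(m: int) -> int:
--     return 0 if m % 2 == 0 else 1 + _trailing_ones(m // 2)
-- ===== Notes on version B (the rewrite author's own statement) =====
-- stated objective: alternative
-- what changed: Replaces A's two position-scanning while loops (probing single bits at increasing shift amounts) by a recursion that peels the mask's low bit via parity test and floor halving: shift accumulates over the even-stripping recursive calls and width comes from a separate trailing-ones recursion; Pre_ excludes masks that are negated powers of two, on which A's width loop (and B's recursion) never terminates, so A returns no value there.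
import Mathlib
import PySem

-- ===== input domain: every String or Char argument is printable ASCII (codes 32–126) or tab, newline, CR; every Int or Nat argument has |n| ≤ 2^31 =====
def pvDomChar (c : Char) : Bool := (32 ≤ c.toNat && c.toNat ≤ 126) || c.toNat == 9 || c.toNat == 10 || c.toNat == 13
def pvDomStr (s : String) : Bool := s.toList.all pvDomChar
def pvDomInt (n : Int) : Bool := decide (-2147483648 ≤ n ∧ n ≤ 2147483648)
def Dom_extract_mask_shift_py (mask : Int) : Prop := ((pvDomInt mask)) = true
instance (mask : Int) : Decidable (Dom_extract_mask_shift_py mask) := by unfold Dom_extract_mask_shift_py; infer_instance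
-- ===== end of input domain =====

-- B replaces A's two index-scanning while loops (shift amounts probed with >> and &) by a
-- recursion that peels the low bit of the mask with % 2 and // 2; objective: alternative.

-- ===== PORT A =====
-- 'while ((mask >> shift) & 1) == 0: shift += 1'; shift is a nonnegative Python int, carried
-- as a Nat and cast to Int at the end.  Fuel is a totality device only: on Dom ∩ Pre_ both
-- loops exit before 64 iterations (proved below); Python's 'm >> k' is Lean's 'm >>> k' and
-- 'x & 1' is PySem.Int.band x 1 (both Python-exact).
def pvShiftLoopA (mask : Int) (shift : Nat) : Nat → Nat
  | 0 => shift
  | f+1 => if PySem.Int.band (mask >>> shift) 1 == 0 then pvShiftLoopA mask (shift+1) f else shift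

-- 'while ((mask >> (shift + width)) & 1) == 1: width += 1'
def pvWidthLoopA (mask : Int) (shift width : Nat) : Nat → Nat
  | 0 => width
  | f+1 => if PySem.Int.band (mask >>> (shift+width)) 1 == 1 then pvWidthLoopA mask shift (width+1) f else width

def extract_mask_shift_py (mask : Int) : Int × Int :=
  if mask == 0 then (0, 8)
  else
    let shift := pvShiftLoopA mask 0 64
    let width := pvWidthLoopA mask shift 0 64
    ((shift : Int), (width : Int))

-- ===== PORT B =====
-- '_trailing_ones(m) = 0 if m % 2 == 0 else 1 + _trailing_ones(m // 2)'; fuel = totality device.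
def pvTrailingOnesB (fuel : Nat) (m : Int) : Int :=
  match fuel with
  | 0 => 0
  | f+1 => if PySem.Int.mod m 2 == 0 then 0 else 1 + pvTrailingOnesB f (PySem.Int.floordiv m 2)

-- the recursive '_extract_mask_shift' of Source B, fuel = totality device for the recursion depth
def pvGoB : Nat → Int → Int × Int
  | 0, _ => (0, 0)
  | f+1, mask =>
    if mask == 0 then (0, 8)
    else if PySem.Int.mod mask 2 == 0 then
      let p := pvGoB f (PySem.Int.floordiv mask 2)
      (p.1 + 1, p.2)
    else (0, pvTrailingOnesB 64 mask)

def extract_mask_shift_py_alt (mask : Int) : Int × Int := pvGoB 64 mask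

-- ===== PRECONDITION & SPEC =====
-- Pre_ excludes exactly the masks of the form -(2^k) (within Dom: k < 32), on which Python A's
-- width loop never terminates (every bit above the lowest set bit is 1), so A returns no value
-- there; Python B diverges on the same masks.
def Pre_extract_mask_shift_py (mask : Int) : Prop := ∀ k : Nat, k < 32 → mask ≠ -(2^k)
instance (mask : Int) : Decidable (Pre_extract_mask_shift_py mask) := by unfold Pre_extract_mask_shift_py; infer_instance

def pvWitness_extract_mask_shift_py : Int := 6

def Spec_extract_mask_shift_py (mask : Int) (out : Int × Int) : Prop := out = extract_mask_shift_py_alt mask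
instance (mask : Int) (out : Int × Int) : Decidable (Spec_extract_mask_shift_py mask out) := by unfold Spec_extract_mask_shift_py; infer_instance

-- ===== CLAIM (what is proved, stated in full; the proofs are below) =====
def Claim_equal_extract_mask_shift_py : Prop := ∀ (mask : Int), Dom_extract_mask_shift_py mask → Pre_extract_mask_shift_py mask → Spec_extract_mask_shift_py mask (extract_mask_shift_py mask)

-- ===== LEMMAS AND PROOFS =====

-- m >> (s+1) = (m // 2) >> s  (divide low bit off first)
theorem pv_shr_succ (m : Int) (s : Nat) : m >>> (s+1) = (PySem.Int.floordiv m 2) >>> s := by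
  rw [Int.shiftRight_eq_div_pow, Int.shiftRight_eq_div_pow,
      PySem.Int.floordiv_eq_ediv_of_pos (by norm_num),
      Int.ediv_ediv_of_nonneg (by norm_num : (0:Int) ≤ 2)]
  push_cast [pow_succ]
  ring_nf

-- m >> (k+1) = (m >> k) // 2  (divide last)
theorem pv_shr_succ' (m : Int) (k : Nat) : m >>> (k+1) = PySem.Int.floordiv (m >>> k) 2 := by
  rw [Int.shiftRight_eq_div_pow, Int.shiftRight_eq_div_pow,
      PySem.Int.floordiv_eq_ediv_of_pos (by norm_num),
      Int.ediv_ediv_of_nonneg (by positivity : (0:Int) ≤ (2^k : Nat))]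
  push_cast [pow_succ]
  ring_nf

theorem pv_shr_zero (m : Int) : m >>> (0:Nat) = m := by simp

-- A's shift loop started one position up scans the halved mask
theorem pv_shiftLoopA_succ (f : Nat) : ∀ (s : Nat) (m : Int),
    pvShiftLoopA m (s+1) f = pvShiftLoopA (PySem.Int.floordiv m 2) s f + 1 := by
  induction f with
  | zero => intro s m; rfl
  | succ f ih =>
    intro s m
    simp only [pvShiftLoopA, pv_shr_succ m s]
    by_cases h : PySem.Int.band (PySem.Int.floordiv m 2 >>> s) 1 == 0
    · simp only [h, if_pos, ih (s+1) m]
    · simp only [h]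
      simp at h
      simp

-- A's width loop equals w + B's trailing-ones of the mask shifted past position s+w
theorem pv_widthLoopA_eq (f : Nat) : ∀ (s w : Nat) (m : Int),
    ((pvWidthLoopA m s w f : Nat) : Int) = w + pvTrailingOnesB f (m >>> (s+w)) := by
  induction f with
  | zero => intro s w m; simp [pvWidthLoopA, pvTrailingOnesB]
  | succ f ih =>
    intro s w m
    have hb : PySem.Int.band (m >>> (s+w)) 1 = PySem.Int.mod (m >>> (s+w)) 2 :=
      PySem.Int.band_one _
    have h0 : 0 ≤ PySem.Int.mod (m >>> (s+w)) 2 := PySem.Int.mod_nonneg _ (by norm_num)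
    have h2 : PySem.Int.mod (m >>> (s+w)) 2 < 2 := PySem.Int.mod_lt _ (by norm_num)
    by_cases hodd : PySem.Int.mod (m >>> (s+w)) 2 = 1
    · have : PySem.Int.band (m >>> (s+w)) 1 == 1 := by rw [hb, hodd]; rfl
      simp only [pvWidthLoopA, this, if_pos, pvTrailingOnesB, hodd]
      rw [ih s (w+1) m]
      have : s + (w + 1) = (s + w) + 1 := by omega
      rw [this, pv_shr_succ' m (s+w)]
      simp

      ring
    · have hz : PySem.Int.mod (m >>> (s+w)) 2 = 0 := by omega
      have : ¬ (PySem.Int.band (m >>> (s+w)) 1 == 1) := by rw [hb, hz]; decide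
      simp only [pvWidthLoopA, this, Bool.false_eq_true, pvTrailingOnesB, hz]
      simp

-- if the k lowest bits of m are all 0 then m = 2^k * (m >> k)
theorem pv_reconstruct (k : Nat) : ∀ (m : Int),
    (∀ j : Nat, j < k → PySem.Int.mod (m >>> j) 2 = 0) → m = 2^k * (m >>> k) := by
  induction k with
  | zero => intro m _; simp
  | succ k ih =>
    intro m h
    have h0 : PySem.Int.mod m 2 = 0 := by
      have := h 0 (by omega); rwa [pv_shr_zero] at this
    have hm : PySem.Int.floordiv m 2 * 2 + PySem.Int.mod m 2 = m :=
      PySem.Int.floordiv_mul_add_mod m 2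
    have hrec := ih (PySem.Int.floordiv m 2) (fun j hj => by
      rw [← pv_shr_succ m j]; exact h (j+1) (by omega))
    rw [pv_shr_succ m k]
    calc m = PySem.Int.floordiv m 2 * 2 := by omega
    _ = (2^k * (PySem.Int.floordiv m 2 >>> k)) * 2 := by rw [← hrec]
    _ = 2^(k+1) * (PySem.Int.floordiv m 2 >>> k) := by ring

-- any nonzero mask in Dom has a set bit among the 64 lowest
theorem pv_exists_odd (m : Int) (hm : m ≠ 0) (hDom : m.natAbs ≤ 2^32) :
    ∃ k : Nat, k < 64 ∧ PySem.Int.mod (m >>> k) 2 = 1 := by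
  by_contra hc
  push Not at hc
  have hall : ∀ j : Nat, j < 64 → PySem.Int.mod (m >>> j) 2 = 0 := by
    intro j hj
    have h0 : 0 ≤ PySem.Int.mod (m >>> j) 2 := PySem.Int.mod_nonneg _ (by norm_num)
    have h2 : PySem.Int.mod (m >>> j) 2 < 2 := PySem.Int.mod_lt _ (by norm_num)
    have := hc j hj
    omega
  have := pv_reconstruct 64 m hall
  have hq : m >>> (64:Nat) ≠ 0 := by
    intro h; rw [h] at this; simp at this; exact hm this
  have h1 := congrArg Int.natAbs this
  rw [Int.natAbs_mul] at h1
  have hq' : 1 ≤ (m >>> (64:Nat)).natAbs := by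
    have := Int.natAbs_eq_zero.not.mpr hq; omega
  have h2 : ((2:Int)^64).natAbs * 1 ≤ ((2:Int)^64).natAbs * (m >>> (64:Nat)).natAbs :=
    Nat.mul_le_mul_left _ hq'
  norm_num at h1 h2
  omega

-- pvGoB computes A's shift and hands A's width loop to pvTrailingOnesB
theorem pv_goB_eq (f : Nat) : ∀ (m : Int), m ≠ 0 →
    (∃ k : Nat, k < f ∧ PySem.Int.mod (m >>> k) 2 = 1) →
    pvGoB f m = (((pvShiftLoopA m 0 f : Nat) : Int),
                 pvTrailingOnesB 64 (m >>> (pvShiftLoopA m 0 f))) := by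
  induction f with
  | zero => intro m _ h; obtain ⟨k, hk, _⟩ := h; omega
  | succ f ih =>
    intro m hm h
    have hmne : ¬ (m == 0) := by simp [hm]
    have h0 : 0 ≤ PySem.Int.mod m 2 := PySem.Int.mod_nonneg _ (by norm_num)
    have h2 : PySem.Int.mod m 2 < 2 := PySem.Int.mod_lt _ (by norm_num)
    have hband : PySem.Int.band (m >>> (0:Nat)) 1 = PySem.Int.mod m 2 := by
      rw [pv_shr_zero]; exact PySem.Int.band_one m
    by_cases hodd : PySem.Int.mod m 2 = 1
    · have hc : ¬ (PySem.Int.mod m 2 == 0) := by rw [hodd]; decide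
      have hcA : ¬ (PySem.Int.band (m >>> (0:Nat)) 1 == 0) := by rw [hband, hodd]; decide
      simp only [pvGoB, hmne, hc, pvShiftLoopA, hcA, Bool.false_eq_true]
      simp
    · have hz : PySem.Int.mod m 2 = 0 := by omega
      have hc : (PySem.Int.mod m 2 == 0) := by rw [hz]; decide
      have hcA : (PySem.Int.band (m >>> (0:Nat)) 1 == 0) := by rw [hband, hz]; decide
      -- the witness bit is not bit 0, so it survives halving
      obtain ⟨k, hk, hko⟩ := h
      have hk0 : k ≠ 0 := by
        intro h0'; rw [h0', pv_shr_zero] at hko; omega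
      have hw2 : PySem.Int.mod (PySem.Int.floordiv m 2 >>> (k-1)) 2 = 1 := by
        rw [← pv_shr_succ m (k-1)]
        have : k - 1 + 1 = k := by omega
        rw [this]; exact hko
      have hhalf : PySem.Int.floordiv m 2 ≠ 0 := by
        intro hq
        have hm' : PySem.Int.floordiv m 2 * 2 + PySem.Int.mod m 2 = m :=
          PySem.Int.floordiv_mul_add_mod m 2
        rw [hq, hz] at hm'; simp at hm'; exact hm hm'.symm
      have ihh := ih (PySem.Int.floordiv m 2) hhalf ⟨k-1, by omega, hw2⟩
      simp only [pvGoB, hmne, hc, if_pos, ihh, pvShiftLoopA, hcA,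
        Bool.false_eq_true, if_false]
      rw [pv_shiftLoopA_succ f 0 m]
      simp only [Prod.mk.injEq]
      constructor
      · push_cast; ring
      · rw [pv_shr_succ m (pvShiftLoopA (PySem.Int.floordiv m 2) 0 f)]

-- ===== VERDICT (by name: the statement is the Claim_ definition above) =====
theorem extract_mask_shift_py_spec : Claim_equal_extract_mask_shift_py := by
  intro mask hDom hPre
  unfold Spec_extract_mask_shift_py extract_mask_shift_py extract_mask_shift_py_alt
  by_cases hm : mask = 0
  · subst hm; rfl
  · have hmne : ¬ (mask == 0) := by simp [hm]
    have habs : mask.natAbs ≤ 2^32 := by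
      unfold Dom_extract_mask_shift_py pvDomInt at hDom
      simp at hDom
      omega
    obtain ⟨k, hk, hko⟩ := pv_exists_odd mask hm habs
    rw [pv_goB_eq 64 mask hm ⟨k, hk, hko⟩]
    simp only [hmne, Bool.false_eq_true]
    have hw := pv_widthLoopA_eq 64 (pvShiftLoopA mask 0 64) 0 mask
    rw [Nat.add_zero] at hw
    rw [hw]
    simp
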